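-- pv_equiv track=rewrite | github.com/Tabdhsan/notion-scripts | movie_data_base.py | get_producer_and_director
-- ===== SOURCE A (Python) =====
-- from typing import List, Optional
--
-- def get_producer_and_director(crew_list: List[dict]) -> List[list]:
--
--     res = [[], []]
--     for crew_member in crew_list:
--         if crew_member["job"] == "Director":
--             res[0].append(crew_member["name"])
--         elif crew_member["job"] == "Producer":
--             res[1].append(crew_member["name"])
--
--     return res
-- ===== SOURCE B (Python) =====
-- from typing import List
--
-- def _names_with_job(crew_list, job):
--     return [m["name"] for m in crew_list if m["job"] == job]
--
-- def get_producer_and_director(crew_list: List[dict]) -> List[list]: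
--     return [_names_with_job(crew_list, "Director"),
--             _names_with_job(crew_list, "Producer")]
-- ===== Notes on version B (the rewrite author's own statement) =====
-- stated objective: simpler
-- what changed: Replaces the single loop appending into fixed mutable result slots with two filter-map comprehensions that each select the names for one job directly.
import Mathlib
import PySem

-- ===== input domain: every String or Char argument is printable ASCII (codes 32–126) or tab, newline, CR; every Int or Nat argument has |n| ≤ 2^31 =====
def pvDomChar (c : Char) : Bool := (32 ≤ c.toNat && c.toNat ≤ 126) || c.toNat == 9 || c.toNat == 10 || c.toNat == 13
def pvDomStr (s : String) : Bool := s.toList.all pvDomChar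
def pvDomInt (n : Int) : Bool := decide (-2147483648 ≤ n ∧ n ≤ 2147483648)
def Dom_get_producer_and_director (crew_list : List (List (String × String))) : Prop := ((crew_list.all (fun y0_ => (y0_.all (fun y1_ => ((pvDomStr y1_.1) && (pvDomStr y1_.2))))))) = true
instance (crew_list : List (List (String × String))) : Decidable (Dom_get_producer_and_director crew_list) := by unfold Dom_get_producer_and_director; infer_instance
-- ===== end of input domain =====

-- B: two filter-map selections (one per job) instead of A's single loop appending into mutable result slots; objective: simpler.


-- ===== PORT A =====
def get_producer_and_director (crew_list : List (List (String × String))) : List (List String) :=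
  let res := crew_list.foldl
    (fun (res : List String × List String) crew_member =>
      if PySem.Dict.getD (PySem.Dict.mk crew_member) "job" "" == "Director" then
        (res.1 ++ [PySem.Dict.getD (PySem.Dict.mk crew_member) "name" ""], res.2)
      else if PySem.Dict.getD (PySem.Dict.mk crew_member) "job" "" == "Producer" then
        (res.1, res.2 ++ [PySem.Dict.getD (PySem.Dict.mk crew_member) "name" ""])
      else res)
    ([], [])
  [res.1, res.2]

-- ===== PORT B =====
def namesWithJob (crew_list : List (List (String × String))) (job : String) : List String :=
  crew_list.filterMap (fun m =>
    if PySem.Dict.getD (PySem.Dict.mk m) "job" "" == job then some (PySem.Dict.getD (PySem.Dict.mk m) "name" "") else none)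

def get_producer_and_director_alt (crew_list : List (List (String × String))) : List (List String) :=
  [namesWithJob crew_list "Director", namesWithJob crew_list "Producer"]

-- ===== PRECONDITION & SPEC =====
-- Pre_ excludes exactly the inputs on which Python A raises KeyError: a crew member
-- without a "job" key, or a Director/Producer member without a "name" key.
def Pre_get_producer_and_director (crew_list : List (List (String × String))) : Prop :=
  ∀ m ∈ crew_list, (PySem.Dict.get? (PySem.Dict.mk m) "job").isSome = true ∧
    ((PySem.Dict.getD (PySem.Dict.mk m) "job" "" = "Director" ∨ PySem.Dict.getD (PySem.Dict.mk m) "job" "" = "Producer") →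
      (PySem.Dict.get? (PySem.Dict.mk m) "name").isSome = true)
instance (crew_list : List (List (String × String))) : Decidable (Pre_get_producer_and_director crew_list) := by unfold Pre_get_producer_and_director; infer_instance
def pvWitness_get_producer_and_director : (List (List (String × String))) :=
  [[("job", "Director"), ("name", "Ann")], [("job", "Writer")], [("job", "Producer"), ("name", "Bob")]]

def Spec_get_producer_and_director (crew_list : List (List (String × String))) (out : List (List String)) : Prop := out = get_producer_and_director_alt crew_list
instance (crew_list : List (List (String × String))) (out : List (List String)) : Decidable (Spec_get_producer_and_director crew_list out) := by unfold Spec_get_producer_and_director; infer_instance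

-- ===== CLAIM (what is proved, stated in full; the proofs are below) =====
def Claim_equal_get_producer_and_director : Prop := ∀ (crew_list : List (List (String × String))), Dom_get_producer_and_director crew_list → Pre_get_producer_and_director crew_list → Spec_get_producer_and_director crew_list (get_producer_and_director crew_list)

-- ===== LEMMAS AND PROOFS =====
theorem pnd_foldl (l : List (List (String × String))) (a b : List String) :
    l.foldl
      (fun (res : List String × List String) crew_member =>
        if PySem.Dict.getD (PySem.Dict.mk crew_member) "job" "" == "Director" then
          (res.1 ++ [PySem.Dict.getD (PySem.Dict.mk crew_member) "name" ""], res.2)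
        else if PySem.Dict.getD (PySem.Dict.mk crew_member) "job" "" == "Producer" then
          (res.1, res.2 ++ [PySem.Dict.getD (PySem.Dict.mk crew_member) "name" ""])
        else res)
      (a, b)
    = (a ++ namesWithJob l "Director", b ++ namesWithJob l "Producer") := by
  induction l generalizing a b with
  | nil => simp [namesWithJob]
  | cons m t ih =>
    simp only [List.foldl_cons, namesWithJob, List.filterMap_cons]
    by_cases hd : PySem.Dict.getD (PySem.Dict.mk m) "job" "" = "Director"
    · rw [if_pos (by simp [hd]), ih]; simp [namesWithJob, hd]
    · by_cases hp : PySem.Dict.getD (PySem.Dict.mk m) "job" "" = "Producer"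
      · rw [if_neg (by simp [hd]), if_pos (by simp [hp]), ih]; simp [namesWithJob, hp]
      · rw [if_neg (by simp [hd]), if_neg (by simp [hp]), ih]; simp [namesWithJob, hd, hp]


-- ===== VERDICT (by name: the statement is the Claim_ definition above) =====
theorem get_producer_and_director_spec : Claim_equal_get_producer_and_director := by
  intro crew_list _ _
  unfold Spec_get_producer_and_director get_producer_and_director get_producer_and_director_alt
  rw [pnd_foldl]
  simp
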